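-- pv_equiv track=rewrite | github.com/huntercuny2x/Technical-Interview-Prep-Bootcamp-Summer-2024 | class_work/week2/day2/grouping_transaction_names.py | groupTransactions
-- ===== SOURCE A (Python) =====
-- def groupTransactions(transactions):
--     transactions_map = {}
--     for t in transactions:
--         transactions_map[t]=transactions_map.get(t, 0)+1
--
--     k=lambda t:(-t[1],t[0])
--     result=sorted(transactions_map.items(), key=k)
--
--     for i in range(len(result)):
--         result[i]=result[i][0]+" "+str(result[i][1])
--
--     return result
-- ===== SOURCE B (Python) =====
-- def groupTransactions(transactions):
--     # sort first, then count by scanning consecutive runs; final sort by (-count, name)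
--     s = sorted(transactions)
--     pairs = []
--     i = 0
--     n = len(s)
--     while i < n:
--         j = i + 1
--         while j < n and s[j] == s[i]:
--             j += 1
--         pairs.append((s[i], j - i))
--         i = j
--     pairs.sort(key=lambda p: (-p[1], p[0]))
--     return [p[0] + " " + str(p[1]) for p in pairs]
-- ===== Notes on version B (the rewrite author's own statement) =====
-- stated objective: alternative
-- what changed: Replaces the hash-map counting loop with sort-then-scan counting: the input is sorted first and counts are obtained by scanning consecutive equal runs with two indices, then the run pairs are sorted by (-count, name) and formatted.
import Mathlib
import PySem

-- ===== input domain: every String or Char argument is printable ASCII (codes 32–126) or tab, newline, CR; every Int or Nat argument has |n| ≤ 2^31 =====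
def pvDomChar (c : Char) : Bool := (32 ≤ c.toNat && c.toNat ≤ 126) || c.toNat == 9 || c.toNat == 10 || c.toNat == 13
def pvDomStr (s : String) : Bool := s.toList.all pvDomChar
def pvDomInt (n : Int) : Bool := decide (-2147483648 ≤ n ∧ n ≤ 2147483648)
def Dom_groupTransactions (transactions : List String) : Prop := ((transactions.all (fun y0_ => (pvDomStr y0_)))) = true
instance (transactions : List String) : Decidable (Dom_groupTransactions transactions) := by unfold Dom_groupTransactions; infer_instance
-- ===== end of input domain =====

-- B counts by sorting then scanning consecutive runs instead of A's dict counting; return values proved equal.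

-- ===== PORT A =====
-- dict loop `transactions_map[t] = transactions_map.get(t, 0) + 1`, then
-- sorted(items, key=lambda t: (-t[1], t[0])), then the in-place formatting loop (as a map).
def groupTransactions (transactions : List String) : List String :=
  let transactionsMap : PySem.Dict String Int :=
    transactions.foldl (fun d t => d.insert t (d.getD t 0 + 1)) PySem.Dict.empty
  let result := PySem.List.sorted2 transactionsMap.items (fun t => -t.2) (fun t => t.1) false
  result.map (fun r => r.1 ++ " " ++ PySem.Int.toStr r.2)

-- ===== PORT B =====
-- B's two-index run scan over the sorted list: each outer `while` iteration consumes one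
-- maximal run starting at i (inner while = takeWhile/dropWhile), exactly Source B's scan.
def pvRuns (s : List String) : List (String × Int) :=
  match s with
  | [] => []
  | x :: rest =>
    (x, (1 : Int) + (rest.takeWhile (fun y => y == x)).length) ::
      pvRuns (rest.dropWhile (fun y => y == x))
termination_by s.length
decreasing_by
  simp only [List.length_cons]
  exact Nat.lt_succ_of_le (List.length_dropWhile_le _ _)

def groupTransactions_alt (transactions : List String) : List String :=
  let s := PySem.List.sorted transactions (fun x => x) false
  let pairs := pvRuns s
  let pairs2 := PySem.List.sorted2 pairs (fun p => -p.2) (fun p => p.1) false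
  pairs2.map (fun p => p.1 ++ " " ++ PySem.Int.toStr p.2)

-- ===== PRECONDITION & SPEC =====
def Spec_groupTransactions (transactions : List String) (out : List String) : Prop := out = groupTransactions_alt transactions
instance (transactions : List String) (out : List String) : Decidable (Spec_groupTransactions transactions out) := by unfold Spec_groupTransactions; infer_instance

-- ===== CLAIM (what is proved, stated in full; the proofs are below) =====
def Claim_equal_groupTransactions : Prop := ∀ (transactions : List String), Dom_groupTransactions transactions → Spec_groupTransactions transactions (groupTransactions transactions)

-- ===== LEMMAS AND PROOFS =====

-- the lexicographic comparison used by both sorts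
def pvBefore (a b : String × Int) : Bool :=
  decide (-a.2 < -b.2) || (!decide (-b.2 < -a.2) && decide (a.1 < b.1))

theorem pvBefore_trans {a b c : String × Int} (h1 : pvBefore a b = true)
    (h2 : pvBefore b c = true) : pvBefore a c = true := by
  simp only [pvBefore, Bool.or_eq_true, Bool.and_eq_true, Bool.not_eq_eq_eq_not,
    Bool.not_true, decide_eq_true_eq, decide_eq_false_iff_not] at *
  rcases h1 with h1 | ⟨h1a, h1b⟩ <;> rcases h2 with h2 | ⟨h2a, h2b⟩
  · exact Or.inl (lt_trans h1 h2)
  · exact Or.inl (lt_of_lt_of_le h1 (le_of_not_gt h2a))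
  · exact Or.inl (lt_of_le_of_lt (le_of_not_gt h1a) h2)
  · exact Or.inr ⟨by omega, lt_trans h1b h2b⟩

theorem pvBefore_conn {a b : String × Int} (h : a.1 ≠ b.1) :
    pvBefore a b = true ∨ pvBefore b a = true := by
  simp only [pvBefore, Bool.or_eq_true, Bool.and_eq_true, Bool.not_eq_eq_eq_not,
    Bool.not_true, decide_eq_true_eq, decide_eq_false_iff_not]
  rcases lt_trichotomy (-a.2) (-b.2) with hl | he | hg
  · exact Or.inl (Or.inl hl)
  · rcases lt_or_gt_of_ne h with hs | hs
    · exact Or.inl (Or.inr ⟨by omega, hs⟩)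
    · exact Or.inr (Or.inr ⟨by omega, hs⟩)
  · exact Or.inr (Or.inl hg)

theorem pvBefore_asymm {a b : String × Int} (h1 : pvBefore a b = true)
    (h2 : pvBefore b a = true) : False := by
  simp only [pvBefore, Bool.or_eq_true, Bool.and_eq_true, Bool.not_eq_eq_eq_not,
    Bool.not_true, decide_eq_true_eq, decide_eq_false_iff_not] at *
  rcases h1 with h1 | ⟨h1a, h1b⟩ <;> rcases h2 with h2 | ⟨h2a, h2b⟩
  · omega
  · omega
  · omega
  · exact absurd h2b (not_lt_of_gt h1b)

theorem pairwise_insertBy (x : String × Int) (ys : List (String × Int))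
    (hys : ys.Pairwise (fun a b => pvBefore a b = true))
    (hcmp : ∀ y ∈ ys, pvBefore x y = true ∨ pvBefore y x = true) :
    (PySem.List.insertBy pvBefore x ys).Pairwise (fun a b => pvBefore a b = true) := by
  induction ys with
  | nil => simp [PySem.List.insertBy]
  | cons y ys ih =>
    rw [List.pairwise_cons] at hys
    have hstep : PySem.List.insertBy pvBefore x (y :: ys) =
        if pvBefore x y = true then x :: y :: ys
        else y :: PySem.List.insertBy pvBefore x ys := rfl
    by_cases hxy : pvBefore x y = true
    · rw [hstep, if_pos hxy, List.pairwise_cons]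
      refine ⟨?_, List.pairwise_cons.2 hys⟩
      intro z hz
      rcases List.mem_cons.1 hz with rfl | hz
      · exact hxy
      · exact pvBefore_trans hxy (hys.1 z hz)
    · rw [hstep, if_neg hxy, List.pairwise_cons]
      have hyx : pvBefore y x = true := by
        rcases hcmp y (by simp) with h | h
        · exact absurd h hxy
        · exact h
      refine ⟨?_, ih hys.2 (fun z hz => hcmp z (by simp [hz]))⟩
      intro z hz
      rcases (PySem.List.mem_insertBy _ _ _ _).1 hz with rfl | hz
      · exact hyx
      · exact hys.1 z hz

theorem pairwise_fold_aux (xs : List (String × Int)) (acc : List (String × Int))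
    (hacc : acc.Pairwise (fun a b => pvBefore a b = true))
    (hcmp : ∀ a ∈ acc, ∀ b ∈ xs, a.1 ≠ b.1)
    (hconn : xs.Pairwise (fun a b => a.1 ≠ b.1)) :
    (xs.foldl (fun acc x => PySem.List.insertBy pvBefore x acc) acc).Pairwise
      (fun a b => pvBefore a b = true) := by
  induction xs generalizing acc with
  | nil => exact hacc
  | cons x xs ih =>
    rw [List.pairwise_cons] at hconn
    refine ih _ ?_ ?_ hconn.2
    · refine pairwise_insertBy x acc hacc (fun y hy => ?_)
      rcases pvBefore_conn (hcmp y hy x (by simp)) with h | h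
      · exact Or.inr h
      · exact Or.inl h
    · intro a ha b hb
      rcases (PySem.List.mem_insertBy _ _ _ _).1 ha with rfl | ha
      · exact hconn.1 b hb
      · exact hcmp a ha b (List.mem_cons_of_mem _ hb)

theorem pairwise_sorted2_fold (xs : List (String × Int))
    (hconn : xs.Pairwise (fun a b => a.1 ≠ b.1)) :
    (xs.foldl (fun acc x => PySem.List.insertBy pvBefore x acc) []).Pairwise
      (fun a b => pvBefore a b = true) :=
  pairwise_fold_aux xs [] (by simp) (by simp) hconn

-- every element of the dropped tail is strictly above x (the run head)
theorem lt_of_mem_dropWhile (x : String) (rest : List String)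
    (hp : rest.Pairwise (· ≤ ·)) (hle : ∀ y ∈ rest, x ≤ y) :
    ∀ z ∈ rest.dropWhile (fun y => y == x), x < z := by
  induction rest with
  | nil => simp
  | cons y t ih =>
    rw [List.pairwise_cons] at hp
    by_cases h : (y == x) = true
    · rw [List.dropWhile_cons, if_pos h]
      exact ih hp.2 (fun z hz => hle z (List.mem_cons_of_mem _ hz))
    · rw [List.dropWhile_cons, if_neg h]
      have hxy : x < y :=
        lt_of_le_of_ne (hle y (by simp)) (fun he => h (by simp [he.symm]))
      intro z hz
      rcases List.mem_cons.1 hz with rfl | hz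
      · exact hxy
      · exact lt_of_lt_of_le hxy (hp.1 z hz)

-- characterization of the run scan on a sorted list
theorem pvRuns_spec : ∀ s : List String, s.Pairwise (· ≤ ·) →
    ((pvRuns s).map Prod.fst).Nodup ∧
    (∀ k, k ∈ (pvRuns s).map Prod.fst ↔ k ∈ s) ∧
    (∀ p ∈ pvRuns s, p.2 = (s.count p.1 : Int)) := by
  intro s
  induction s using pvRuns.induct with
  | case1 => simp [pvRuns]
  | case2 x rest ih =>
    intro hs
    rw [List.pairwise_cons] at hs
    have hrest' : ∀ z ∈ rest.dropWhile (fun y => y == x), x < z :=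
      lt_of_mem_dropWhile x rest hs.2 hs.1
    have hsorted' : (rest.dropWhile (fun y => y == x)).Pairwise (· ≤ ·) :=
      hs.2.sublist (List.dropWhile_sublist _)
    obtain ⟨ihn, ihm, ihc⟩ := ih hsorted'
    have hsame : ∀ y ∈ rest.takeWhile (fun y => y == x), y = x := by
      intro y hy
      simpa using List.mem_takeWhile_imp hy
    have hsplit : rest.takeWhile (fun y => y == x) ++ rest.dropWhile (fun y => y == x) = rest :=
      List.takeWhile_append_dropWhile
    have hrc : ∀ k, rest.count k = (rest.takeWhile (fun y => y == x)).count k +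
        (rest.dropWhile (fun y => y == x)).count k := by
      intro k
      rw [← List.count_append, hsplit]
    have hcx : (x :: rest).count x = 1 + (rest.takeWhile (fun y => y == x)).length := by
      have h1 : (rest.takeWhile (fun y => y == x)).count x =
          (rest.takeWhile (fun y => y == x)).length :=
        List.count_eq_length.2 (fun b hb => (hsame b hb).symm)
      have h2 : (rest.dropWhile (fun y => y == x)).count x = 0 :=
        List.count_eq_zero.2 (fun hm => lt_irrefl x (hrest' x hm))
      have h3 := hrc x
      rw [List.count_cons_self]
      omega
    have hck : ∀ k, k ≠ x → (x :: rest).count k = (rest.dropWhile (fun y => y == x)).count k := by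
      intro k hk
      have h1 : (rest.takeWhile (fun y => y == x)).count k = 0 :=
        List.count_eq_zero.2 (fun hm => hk (hsame k hm))
      have h3 := hrc k
      have hne : (x == k) = false := beq_eq_false_iff_ne.2 (Ne.symm hk)
      simp [List.count_cons, hne]
      omega
    rw [pvRuns]
    refine ⟨?_, ?_, ?_⟩
    · simp only [List.map_cons, List.nodup_cons]
      refine ⟨fun hm => ?_, ihn⟩
      exact lt_irrefl x (hrest' x ((ihm x).1 hm))
    · intro k
      simp only [List.map_cons, List.mem_cons, ihm]
      constructor
      · rintro (rfl | hk)
        · simp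
        · exact Or.inr (List.Sublist.mem hk (List.dropWhile_sublist _))
      · rintro (rfl | hk)
        · exact Or.inl rfl
        · rcases List.mem_append.1 (hsplit ▸ hk) with h | h
          · exact Or.inl (hsame k h)
          · exact Or.inr h
    · intro p hp
      rcases List.mem_cons.1 hp with rfl | hp
      · simp only [hcx]
        push_cast
        ring
      · rw [ihc p hp]
        have hmem : p.1 ∈ rest.dropWhile (fun y => y == x) :=
          (ihm p.1).1 (List.mem_map_of_mem hp)
        have hpx : p.1 ≠ x := fun he => lt_irrefl x (he ▸ hrest' p.1 hmem)
        rw [hck p.1 hpx]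

-- rebuild a run list from its distinct names
theorem map_fst_recover (l : List (String × Int)) (c : String → Int)
    (h : ∀ p ∈ l, p.2 = c p.1) :
    (l.map Prod.fst).map (fun k => (k, c k)) = l := by
  induction l with
  | nil => rfl
  | cons p t ih =>
    simp only [List.map_cons, List.cons.injEq]
    exact ⟨Prod.ext rfl (h p (by simp)).symm, ih (fun q hq => h q (List.mem_cons_of_mem _ hq))⟩

-- the central equality of the two sorted pair lists
theorem sorted2_eq_fold (xs : List (String × Int)) :
    PySem.List.sorted2 xs (fun p => -p.2) (fun p => p.1) false =
      xs.foldl (fun acc x => PySem.List.insertBy pvBefore x acc) [] := rfl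

theorem pairs_eq (txs : List String) :
    PySem.List.sorted2
      (txs.foldl (fun d t => d.insert t (d.getD t 0 + 1))
        (PySem.Dict.empty : PySem.Dict String Int)).items
      (fun t => -t.2) (fun t => t.1) false =
    PySem.List.sorted2 (pvRuns (PySem.List.sorted txs (fun x => x) false))
      (fun p => -p.2) (fun p => p.1) false := by
  have hdict : (txs.foldl (fun d t => d.insert t (d.getD t 0 + 1))
      (PySem.Dict.empty : PySem.Dict String Int)).items =
      (PySem.Set.ofList txs).map (fun k => (k, (txs.count k : Int))) := by
    rw [PySem.Dict.foldl_insert_getD_add_one_eq_counter, PySem.Dict.items_counter]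
  set s := PySem.List.sorted txs (fun x => x) false with hsdef
  set items := (txs.foldl (fun d t => d.insert t (d.getD t 0 + 1))
      (PySem.Dict.empty : PySem.Dict String Int)).items with hidef
  have hsperm : s.Perm txs := PySem.List.sorted_perm txs (fun x => x) false
  have hss : s.Pairwise (· ≤ ·) := PySem.List.sorted_pairwise txs (fun x => x)
  obtain ⟨hn, hm, hc⟩ := pvRuns_spec s hss
  have hruns : (pvRuns s) = ((pvRuns s).map Prod.fst).map (fun k => (k, (txs.count k : Int))) := by
    rw [map_fst_recover]
    intro p hp
    rw [hc p hp, hsperm.count_eq]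
  have hfstperm : ((pvRuns s).map Prod.fst).Perm (PySem.Set.ofList txs) := by
    rw [List.perm_ext_iff_of_nodup hn (PySem.Set.nodup_ofList txs)]
    intro k
    rw [hm k, PySem.Set.mem_ofList]
    exact hsperm.mem_iff
  have hperm : items.Perm (pvRuns s) := by
    rw [hdict, hruns]
    exact (hfstperm.map _).symm
  have hconnA : items.Pairwise (fun a b => a.1 ≠ b.1) := by
    rw [hdict, List.pairwise_map]
    exact PySem.Set.nodup_ofList txs
  have hconnB : (pvRuns s).Pairwise (fun a b => a.1 ≠ b.1) := by
    rw [← List.pairwise_map (f := Prod.fst) (R := (· ≠ ·))]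
    exact hn
  have hsortA := pairwise_sorted2_fold _ hconnA
  have hsortB := pairwise_sorted2_fold _ hconnB
  have pA : (items.foldl (fun acc x => PySem.List.insertBy pvBefore x acc) []).Perm items := by
    have h := PySem.List.sorted2_perm items (fun t : String × Int => -t.2) (fun t => t.1) false
    rw [sorted2_eq_fold] at h
    exact h
  have pB : ((pvRuns s).foldl (fun acc x => PySem.List.insertBy pvBefore x acc) []).Perm
      (pvRuns s) := by
    have h := PySem.List.sorted2_perm (pvRuns s) (fun t : String × Int => -t.2) (fun t => t.1) false
    rw [sorted2_eq_fold] at h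
    exact h
  rw [sorted2_eq_fold items, sorted2_eq_fold (pvRuns s)]
  exact List.Perm.eq_of_pairwise
    (fun a b _ _ h1 h2 => absurd (pvBefore_asymm h1 h2) not_false)
    hsortA hsortB ((pA.trans hperm).trans pB.symm)

-- ===== VERDICT (by name: the statement is the Claim_ definition above) =====
theorem groupTransactions_spec : Claim_equal_groupTransactions := by
  intro txs _
  unfold Spec_groupTransactions groupTransactions groupTransactions_alt
  simp only []
  rw [pairs_eq]
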